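-- pv_equiv track=rewrite | github.com/ShuvalovAnthony/ez_python | Katia/9/21408/21408.py | check
-- ===== SOURCE A (Python) =====
-- def check(row: list):
--     povtor = []
--     unique = []
--
--     for num in row:
--         if row.count(num) == 3:
--             povtor.append(num)
--         elif row.count(num) == 1:
--             unique.append(num)
--
--     return (
--         (len(povtor) == 6) and
--         (len(unique) == 1) and
--         (max(povtor) > unique[0])
--     )
-- ===== SOURCE B (Python) =====
-- def check(row: list):
--     counts = {}
--     for num in row:
--         counts[num] = counts.get(num, 0) + 1
--     triples = [v for v, c in counts.items() if c == 3]
--     singles = [v for v, c in counts.items() if c == 1]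
--     return len(triples) == 2 and len(singles) == 1 and max(triples) > singles[0]
-- ===== Notes on version B (the rewrite author's own statement) =====
-- stated objective: faster
-- what changed: Replaces the per-element row.count scans (quadratic) by one pass building a value->count dict, then judges the distinct values whose count is 3 or 1.
import Mathlib
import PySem

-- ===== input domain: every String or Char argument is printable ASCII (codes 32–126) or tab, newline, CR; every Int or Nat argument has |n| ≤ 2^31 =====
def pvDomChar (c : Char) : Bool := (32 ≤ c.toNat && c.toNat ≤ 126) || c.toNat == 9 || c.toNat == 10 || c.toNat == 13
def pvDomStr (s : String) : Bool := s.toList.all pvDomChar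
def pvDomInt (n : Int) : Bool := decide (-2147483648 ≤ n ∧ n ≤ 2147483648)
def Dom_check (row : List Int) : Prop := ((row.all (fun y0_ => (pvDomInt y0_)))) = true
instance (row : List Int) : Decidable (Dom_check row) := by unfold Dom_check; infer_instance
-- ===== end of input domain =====

-- B replaces A's per-element row.count scans by a single counting-dict pass; objective: faster.

-- ===== PORT A =====
-- A: two accumulator lists filled by scanning row and re-counting each element, then the guarded comparison.
def check (row : List Int) : Bool :=
  let pu : List Int × List Int :=
    row.foldl (fun (acc : List Int × List Int) num =>
      if row.count num = 3 then (acc.1 ++ [num], acc.2)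
      else if row.count num = 1 then (acc.1, acc.2 ++ [num])
      else acc) ([], [])
  (pu.1.length == 6) && (pu.2.length == 1) &&
    (match PySem.List.max? pu.1 (fun y => y), PySem.List.pyGet? pu.2 0 with
     | some m, some u => decide (u < m)
     | _, _ => false)   -- max(povtor) > unique[0]; only reached (in Python) when both guards hold

-- ===== PORT B =====
-- B: build counts dict in one pass, judge the distinct values whose count is 3 (triples) or 1 (singles).
def check_alt (row : List Int) : Bool :=
  let counts : PySem.Dict Int Int :=
    row.foldl (fun d num => d.insert num (d.getD num 0 + 1)) PySem.Dict.empty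
  let triples : List Int := ((counts.items.filter (fun p => p.2 == 3)).map Prod.fst)
  let singles : List Int := ((counts.items.filter (fun p => p.2 == 1)).map Prod.fst)
  (triples.length == 2) && (singles.length == 1) &&
    (match PySem.List.pyGet? singles 0 with
     | some u =>
       match PySem.List.max? triples (fun y => y) with
       | some m => decide (u < m)
       | none => false
     | none => false)

-- ===== PRECONDITION & SPEC =====
def Spec_check (row : List Int) (out : Bool) : Prop := out = check_alt row
instance (row : List Int) (out : Bool) : Decidable (Spec_check row out) := by unfold Spec_check; infer_instance

-- ===== CLAIM (what is proved, stated in full; the proofs are below) =====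
def Claim_equal_check : Prop := ∀ (row : List Int), Dom_check row → Spec_check row (check row)

-- ===== LEMMAS AND PROOFS =====

-- A's loop is the pair of filters (count = 3, count = 1).
theorem checkA_pair (row : List Int) (l : List Int) (acc : List Int × List Int) :
    l.foldl (fun (acc : List Int × List Int) num =>
      if row.count num = 3 then (acc.1 ++ [num], acc.2)
      else if row.count num = 1 then (acc.1, acc.2 ++ [num])
      else acc) acc
    = (acc.1 ++ l.filter (fun n => row.count n == 3),
       acc.2 ++ l.filter (fun n => row.count n == 1)) := by
  induction l generalizing acc with
  | nil => simp
  | cons x t ih =>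
    simp only [List.foldl_cons, List.filter_cons]
    by_cases h3 : row.count x = 3
    · simp [h3, ih, List.append_assoc]
    · by_cases h1 : row.count x = 1
      · simp [h1, ih, List.append_assoc]
      · simp [h3, h1, ih]

-- length of (row.filter (count = c)) is c times the number of distinct such values
theorem filter_count_length (row : List Int) (c : Nat)
    (p : Int → Bool) (hp : ∀ x, p x = true → row.count x = c) :
    (row.filter p).length = c * ((PySem.Set.ofList row).filter p).length := by
  have hfin : (row.filter p).toFinset = ((PySem.Set.ofList row).filter p).toFinset := by
    ext a
    simp [PySem.Set.mem_ofList]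
  have hlen : (row.filter p).length = ∑ a ∈ (row.filter p).toFinset, (row.filter p).count a :=
    (List.sum_toFinset_count_eq_length _).symm
  have hcount : ∀ a ∈ (row.filter p).toFinset, (row.filter p).count a = c := by
    intro a ha
    have hap : p a = true := by
      simp at ha; exact ha.2
    rw [List.count_filter hap]
    exact hp a hap
  have hnodup : ((PySem.Set.ofList row).filter p).Nodup :=
    (PySem.Set.nodup_ofList row).filter p
  calc (row.filter p).length
      = ∑ a ∈ (row.filter p).toFinset, (row.filter p).count a := hlen
    _ = ∑ _a ∈ (row.filter p).toFinset, c := Finset.sum_congr rfl hcount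
    _ = (row.filter p).toFinset.card * c := by rw [Finset.sum_const, smul_eq_mul]
    _ = ((PySem.Set.ofList row).filter p).toFinset.card * c := by rw [hfin]
    _ = ((PySem.Set.ofList row).filter p).length * c := by
        rw [List.toFinset_card_of_nodup hnodup]
    _ = c * ((PySem.Set.ofList row).filter p).length := Nat.mul_comm _ _

-- same membership → same max? (with identity key, over Int)
theorem max?_eq_of_mem_iff (l l' : List Int)
    (h : ∀ x, x ∈ l ↔ x ∈ l') (hne : l ≠ []) :
    PySem.List.max? l (fun y => y) = PySem.List.max? l' (fun y => y) := by
  have hne' : l' ≠ [] := by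
    intro h0
    obtain ⟨a, ha⟩ := List.exists_mem_of_ne_nil l hne
    exact absurd ((h a).mp ha) (by simp [h0])
  obtain ⟨m, hm⟩ : ∃ m, PySem.List.max? l (fun y => y) = some m := by
    cases hq : PySem.List.max? l (fun y => y) with
    | none => exact absurd ((PySem.List.max?_eq_none_iff _ _).mp hq) hne
    | some m => exact ⟨m, rfl⟩
  obtain ⟨m', hm'⟩ : ∃ m', PySem.List.max? l' (fun y => y) = some m' := by
    cases hq : PySem.List.max? l' (fun y => y) with
    | none => exact absurd ((PySem.List.max?_eq_none_iff _ _).mp hq) hne'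
    | some m => exact ⟨m, rfl⟩
  have h1 : m ≤ m' := PySem.List.max?_isMax hm' m ((h m).mp (PySem.List.max?_mem hm))
  have h2 : m' ≤ m := PySem.List.max?_isMax hm m' ((h m').mpr (PySem.List.max?_mem hm'))
  rw [hm, hm', le_antisymm h1 h2]

-- B's triples/singles lists are filters of the ordered dedup
theorem check_alt_items (row : List Int) (c : Int) :
    ((((row.foldl (fun d num => d.insert num (d.getD num 0 + 1))
        PySem.Dict.empty).items.filter (fun p => p.2 == c)).map Prod.fst))
    = (PySem.Set.ofList row).filter (fun n => (row.count n : Int) == c) := by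
  rw [PySem.Dict.foldl_insert_getD_add_one_eq_counter, PySem.Dict.items_counter]
  simp [List.filter_map, Function.comp_def]

theorem check_eq_alt (row : List Int) : check row = check_alt row := by
  simp only [check, check_alt]
  rw [checkA_pair row row ([], []), check_alt_items row 3, check_alt_items row 1]
  simp only [List.nil_append]
  set p3 : Int → Bool := fun n => row.count n == 3 with hp3
  set p1 : Int → Bool := fun n => row.count n == 1 with hp1
  have e3 : (fun n => (row.count n : Int) == (3 : Int)) = p3 := by
    funext n
    by_cases h : row.count n = 3
    · simp [hp3, h]
    · have h' : (row.count n : Int) ≠ 3 := by exact_mod_cast h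
      simp [hp3, h, h']
  have e1 : (fun n => (row.count n : Int) == (1 : Int)) = p1 := by
    funext n
    by_cases h : row.count n = 1
    · simp [hp1, h]
    · have h' : (row.count n : Int) ≠ 1 := by exact_mod_cast h
      simp [hp1, h, h']
  rw [e3, e1]
  have L3 : (row.filter p3).length = 3 * ((PySem.Set.ofList row).filter p3).length :=
    filter_count_length row 3 p3 (by intro x hx; simpa [hp3] using hx)
  have L1 : (row.filter p1).length = 1 * ((PySem.Set.ofList row).filter p1).length :=
    filter_count_length row 1 p1 (by intro x hx; simpa [hp1] using hx)
  by_cases h2 : ((PySem.Set.ofList row).filter p3).length = 2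
  · by_cases hs1 : ((PySem.Set.ofList row).filter p1).length = 1
    · -- all guards pass on both sides
      have h6 : (row.filter p3).length = 6 := by omega
      have hu1 : (row.filter p1).length = 1 := by omega
      obtain ⟨u, hu⟩ := List.length_eq_one_iff.mp hu1
      obtain ⟨u', hu'⟩ := List.length_eq_one_iff.mp hs1
      have huu : u' = u := by
        have hm1 : u' ∈ (PySem.Set.ofList row).filter p1 := by rw [hu']; simp
        have hm2 : u' ∈ row.filter p1 := by
          simp only [List.mem_filter, PySem.Set.mem_ofList] at hm1 ⊢
          exact hm1
        rw [hu] at hm2; simpa using hm2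
      have hmax : PySem.List.max? (row.filter p3) (fun y => y)
          = PySem.List.max? ((PySem.Set.ofList row).filter p3) (fun y => y) := by
        apply max?_eq_of_mem_iff
        · intro x; simp [List.mem_filter, PySem.Set.mem_ofList]
        · intro h0; rw [h0] at h6; simp at h6
      rw [h6, hu1, h2, hs1, hmax, hu, hu', huu]
      cases hq : PySem.List.max? ((PySem.Set.ofList row).filter p3) (fun y => y) <;>
        simp [PySem.List.pyGet?, PySem.List.pyIdx?]
    · have hne : (row.filter p1).length ≠ 1 := by omega
      have b1 : ((row.filter p1).length == 1) = false := by simpa using hne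
      have b2 : (((PySem.Set.ofList row).filter p1).length == 1) = false := by simpa using hs1
      rw [b1, b2]
      simp
  · have hne : (row.filter p3).length ≠ 6 := by omega
    have b1 : ((row.filter p3).length == 6) = false := by simpa using hne
    have b2 : (((PySem.Set.ofList row).filter p3).length == 2) = false := by simpa using h2
    rw [b1, b2]
    simp

-- ===== VERDICT (by name: the statement is the Claim_ definition above) =====
theorem check_spec : Claim_equal_check := by
  intro row _
  unfold Spec_check
  exact check_eq_alt row
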